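-- pv_equiv track=rewrite | github.com/amrit19/SP-Rank-Dataset | full_ground_truth_recovery.py | copeland_voting_rule
-- ===== SOURCE A (Python) =====
-- from collections import defaultdict
--
-- def copeland_voting_rule(votes):
--     # Count the frequency of each alternative
--     frequency = defaultdict(int)
--     for vote_list in votes:
--         vote = vote_list[0]
--         frequency[vote] += 1
--     scores = {alternative: 0 for alternative in frequency}
--     for alt_a in frequency:
--         for alt_b in frequency:
--             if alt_a == alt_b:
--                 continue
--             if frequency[alt_a] > frequency[alt_b]:
--                 scores[alt_a] += 1
--             elif frequency[alt_a] < frequency[alt_b]: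
--                 scores[alt_a] -= 1
--
--     # Sort alternatives based on the Copeland scores
--     sorted_scores = sorted(scores.items(), key=lambda x: x[1], reverse=True)
--     return [key for key, value in sorted_scores]
-- ===== SOURCE B (Python) =====
-- def copeland_voting_rule(votes):
--     # Count first-choice frequencies (insertion order = first occurrence).
--     frequency = {}
--     for vote_list in votes:
--         v = vote_list[0]
--         frequency[v] = frequency.get(v, 0) + 1
--     # The Copeland score is strictly monotone in the frequency, so the score
--     # ranking is exactly the stable descending sort by frequency.
--     return sorted(frequency, key=lambda a: frequency[a], reverse=True)
-- ===== Notes on version B (the rewrite author's own statement) =====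
-- stated objective: simpler
-- what changed: A's O(m^2) pairwise comparison of all alternative frequencies (building a Copeland score dict) is replaced by a single stable descending sort of the alternatives by first-choice frequency, which yields the identical ranking because the Copeland score is strictly monotone in the frequency.
import Mathlib
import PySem

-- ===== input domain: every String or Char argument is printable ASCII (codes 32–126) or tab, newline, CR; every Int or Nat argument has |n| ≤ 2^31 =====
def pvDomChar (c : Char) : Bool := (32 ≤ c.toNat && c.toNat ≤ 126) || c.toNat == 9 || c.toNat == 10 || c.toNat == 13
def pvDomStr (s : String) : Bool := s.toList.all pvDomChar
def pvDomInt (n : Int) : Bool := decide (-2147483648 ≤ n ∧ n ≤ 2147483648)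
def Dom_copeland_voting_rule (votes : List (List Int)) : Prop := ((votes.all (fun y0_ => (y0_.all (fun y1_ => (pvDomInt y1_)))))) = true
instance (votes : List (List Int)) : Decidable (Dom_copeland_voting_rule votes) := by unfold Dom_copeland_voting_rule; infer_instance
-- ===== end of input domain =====

-- B replaces A's quadratic pairwise Copeland-score loop by one stable descending sort
-- of the alternatives by first-choice frequency (the score is strictly monotone in the
-- frequency, so the two rankings coincide); objective: simpler.

-- ===== PORT A =====
def copeland_voting_rule (votes : List (List Int)) : List Int :=
  -- frequency = defaultdict(int); for vote_list in votes: frequency[vote_list[0]] += 1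
  let frequency : PySem.Dict Int Int :=
    votes.foldl (fun d vl => d.modify ((PySem.List.pyGet? vl 0).getD 0) 0 (· + 1)) PySem.Dict.empty
  -- scores = {alternative: 0 for alternative in frequency}
  let scores0 : PySem.Dict Int Int :=
    frequency.keys.foldl (fun s alt => s.insert alt 0) PySem.Dict.empty
  -- for alt_a in frequency: for alt_b in frequency: ±1 per won/lost comparison
  let scores : PySem.Dict Int Int :=
    frequency.keys.foldl (fun s altA =>
      frequency.keys.foldl (fun s altB =>
        if altA = altB then s
        else if frequency.getD altA 0 > frequency.getD altB 0 then s.insert altA (s.getD altA 0 + 1)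
        else if frequency.getD altA 0 < frequency.getD altB 0 then s.insert altA (s.getD altA 0 - 1)
        else s) s) scores0
  -- sorted(scores.items(), key=lambda x: x[1], reverse=True); return the keys
  (PySem.List.sorted scores.items (fun p => p.2) true).map (fun p => p.1)

-- ===== PORT B =====
def copeland_voting_rule_alt (votes : List (List Int)) : List Int :=
  -- frequency = {}; for vote_list in votes: v = vote_list[0]; frequency[v] = frequency.get(v, 0) + 1
  let frequency : PySem.Dict Int Int :=
    votes.foldl (fun d vl =>
      let v := (PySem.List.pyGet? vl 0).getD 0
      d.insert v (d.getD v 0 + 1)) PySem.Dict.empty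
  -- return sorted(frequency, key=lambda a: frequency[a], reverse=True)
  PySem.List.sorted frequency.keys (fun a => frequency.getD a 0) true

-- ===== PRECONDITION & SPEC =====
-- Pre_ excludes votes containing an empty ballot, on which A raises IndexError (vote_list[0]); B raises there too.
def Pre_copeland_voting_rule (votes : List (List Int)) : Prop := ∀ vl ∈ votes, vl ≠ []
instance (votes : List (List Int)) : Decidable (Pre_copeland_voting_rule votes) := by
  unfold Pre_copeland_voting_rule; infer_instance
def pvWitness_copeland_voting_rule : List (List Int) := [[1], [2], [1]]

def Spec_copeland_voting_rule (votes : List (List Int)) (out : List Int) : Prop := out = copeland_voting_rule_alt votes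
instance (votes : List (List Int)) (out : List Int) : Decidable (Spec_copeland_voting_rule votes out) := by unfold Spec_copeland_voting_rule; infer_instance

-- ===== CLAIM (what is proved, stated in full; the proofs are below) =====
def Claim_equal_copeland_voting_rule : Prop := ∀ (votes : List (List Int)), Dom_copeland_voting_rule votes → Pre_copeland_voting_rule votes → Spec_copeland_voting_rule votes (copeland_voting_rule votes)

-- ===== LEMMAS AND PROOFS =====

-- the Copeland score of a over the key list K under frequency dict F:
-- (#alternatives with smaller frequency) - (#alternatives with larger frequency)
def pvDelta (F : PySem.Dict Int Int) (K : List Int) (a : Int) : Int :=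
  (K.countP (fun b => decide (F.getD b 0 < F.getD a 0)) : Int)
    - (K.countP (fun b => decide (F.getD a 0 < F.getD b 0)) : Int)

-- A's defaultdict counting loop is Counter(first choices)
lemma pvFreqA (votes : List (List Int)) (g : List Int → Int) :
    votes.foldl (fun d vl => d.modify (g vl) 0 (· + 1)) PySem.Dict.empty
      = PySem.Dict.counter (votes.map g) := by
  rw [PySem.Dict.counter_eq_foldl, List.foldl_map]

-- B's dict.get counting loop is Counter(first choices) too
lemma pvFreqB (votes : List (List Int)) (g : List Int → Int) :
    votes.foldl (fun d vl => d.insert (g vl) (d.getD (g vl) 0 + 1)) PySem.Dict.empty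
      = PySem.Dict.counter (votes.map g) := by
  rw [← PySem.Dict.foldl_insert_getD_add_one_eq_counter, List.foldl_map]

-- overwriting a key twice keeps only the second value
lemma pvInsertInsert (d : PySem.Dict Int Int) (k v w : Int) :
    (d.insert k v).insert k w = d.insert k w := by
  apply PySem.Dict.ext
  by_cases h : d.contains k = true
  · rw [PySem.Dict.items_insert_of_contains _ w (by simp),
        PySem.Dict.items_insert_of_contains _ v h,
        PySem.Dict.items_insert_of_contains _ w h, List.map_map]
    apply List.map_congr_left
    intro p _
    by_cases hp : p.1 = k <;> simp [hp]
  · rw [PySem.Dict.items_insert_of_contains _ w (by simp),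
        PySem.Dict.items_insert_of_not_contains _ v (by simpa using h),
        PySem.Dict.items_insert_of_not_contains _ w (by simpa using h),
        List.map_append]
    have hcong : ∀ p ∈ d.items, (if (p.1 == k) = true then (k, w) else p) = p := by
      intro p hp
      have hk : p.1 ≠ k := by
        intro hkk
        exact h (by rw [PySem.Dict.contains_iff_mem_keys]; exact hkk ▸ (List.mem_map_of_mem hp))
      simp [hk]
    rw [List.map_congr_left hcong]
    simp

-- re-inserting the current value of an existing key is a no-op
lemma pvInsertGetDSelf (d : PySem.Dict Int Int) (a : Int)
    (h : a ∈ d.keys) (hnd : d.keys.Nodup) :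
    d.insert a (d.getD a 0) = d := by
  apply PySem.Dict.ext
  rw [PySem.Dict.items_insert_of_contains _ _ ((PySem.Dict.contains_iff_mem_keys d a).mpr h)]
  have hcong : ∀ p ∈ d.items, (if (p.1 == a) = true then (a, d.getD a 0) else p) = p := by
    intro p hp
    by_cases hk : p.1 = a
    · have hv : d.getD a 0 = p.2 := by
        have := PySem.Dict.getD_of_mem_items (k := p.1) (v := p.2) d (by simpa using hp) hnd 0
        rw [← hk]; exact this
      rw [if_pos (by simpa using hk), hv, ← hk]
    · simp [hk]
  rw [List.map_congr_left hcong]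
  simp

-- A's inner loop, started from an a-insertion, accumulates the Copeland score of a
lemma pvInner (F : PySem.Dict Int Int) (a : Int) (L : List Int) :
    ∀ (s : PySem.Dict Int Int) (d : Int),
    L.foldl (fun s b =>
        if a = b then s
        else if F.getD a 0 > F.getD b 0 then s.insert a (s.getD a 0 + 1)
        else if F.getD a 0 < F.getD b 0 then s.insert a (s.getD a 0 - 1)
        else s) (s.insert a (s.getD a 0 + d))
      = s.insert a (s.getD a 0 + (d + pvDelta F L a)) := by
  induction L with
  | nil => intro s d; simp [pvDelta]
  | cons b L ih =>
    intro s d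
    simp only [List.foldl_cons]
    by_cases hab : a = b
    · have h1 : ¬ (F.getD a 0 > F.getD b 0) := by rw [hab]; omega
      have h2 : ¬ (F.getD a 0 < F.getD b 0) := by rw [hab]; omega
      rw [if_pos hab, ih s d]
      congr 1
      simp only [pvDelta, List.countP_cons]
      have e1 : (decide (F.getD b 0 < F.getD a 0)) = false := by rw [hab]; simp
      have e2 : (decide (F.getD a 0 < F.getD b 0)) = false := by rw [hab]; simp
      rw [e1, e2]
      simp
    · rw [if_neg hab]
      by_cases h1 : F.getD a 0 > F.getD b 0
      · rw [if_pos h1, PySem.Dict.getD_insert_self, pvInsertInsert,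
            show s.getD a 0 + d + 1 = s.getD a 0 + (d+1) by ring, ih s (d+1)]
        congr 1
        simp only [pvDelta, List.countP_cons]
        have e1 : (decide (F.getD b 0 < F.getD a 0)) = true := by simp; omega
        have e2 : (decide (F.getD a 0 < F.getD b 0)) = false := by simp; omega
        rw [e1, e2]
        simp only [if_true]
        push_cast
        ring
      · rw [if_neg h1]
        by_cases h2 : F.getD a 0 < F.getD b 0
        · rw [if_pos h2, PySem.Dict.getD_insert_self, pvInsertInsert,
              show s.getD a 0 + d - 1 = s.getD a 0 + (d-1) by ring, ih s (d-1)]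
          congr 1
          simp only [pvDelta, List.countP_cons]
          have e1 : (decide (F.getD b 0 < F.getD a 0)) = false := by simp; omega
          have e2 : (decide (F.getD a 0 < F.getD b 0)) = true := by simp; omega
          rw [e1, e2]
          simp only [if_true]
          push_cast
          ring
        · rw [if_neg h2, ih s d]
          congr 1
          simp only [pvDelta, List.countP_cons]
          have e1 : (decide (F.getD b 0 < F.getD a 0)) = false := by simp; omega
          have e2 : (decide (F.getD a 0 < F.getD b 0)) = false := by simp; omega
          rw [e1, e2]
          simp

-- A's outer loop: keys are preserved, and every processed key a ends at pvDelta F K a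
lemma pvOuter (F : PySem.Dict Int Int) (K : List Int) :
    ∀ (A' : List Int) (s : PySem.Dict Int Int), A'.Nodup →
    (∀ x ∈ A', x ∈ s.keys) → s.keys.Nodup →
    (A'.foldl (fun s altA =>
        K.foldl (fun s altB =>
          if altA = altB then s
          else if F.getD altA 0 > F.getD altB 0 then s.insert altA (s.getD altA 0 + 1)
          else if F.getD altA 0 < F.getD altB 0 then s.insert altA (s.getD altA 0 - 1)
          else s) s) s).keys = s.keys ∧
    ∀ x, (A'.foldl (fun s altA =>
        K.foldl (fun s altB =>
          if altA = altB then s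
          else if F.getD altA 0 > F.getD altB 0 then s.insert altA (s.getD altA 0 + 1)
          else if F.getD altA 0 < F.getD altB 0 then s.insert altA (s.getD altA 0 - 1)
          else s) s) s).getD x 0
      = if x ∈ A' then s.getD x 0 + pvDelta F K x else s.getD x 0 := by
  intro A'
  induction A' with
  | nil => intro s _ _ _; simp
  | cons a A' ih =>
    intro s hnd hmem hk
    simp only [List.foldl_cons]
    have hmema : a ∈ s.keys := hmem a (by simp)
    have hinner :
        K.foldl (fun s altB =>
          if a = altB then s
          else if F.getD a 0 > F.getD altB 0 then s.insert a (s.getD a 0 + 1)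
          else if F.getD a 0 < F.getD altB 0 then s.insert a (s.getD a 0 - 1)
          else s) s = s.insert a (s.getD a 0 + pvDelta F K a) := by
      have := pvInner F a K s 0
      rw [show s.getD a 0 + (0:Int) = s.getD a 0 by ring, pvInsertGetDSelf s a hmema hk] at this
      rw [this, zero_add]
    rw [hinner]
    have hkeys' : (s.insert a (s.getD a 0 + pvDelta F K a)).keys = s.keys :=
      PySem.Dict.keys_insert_of_contains s _ ((PySem.Dict.contains_iff_mem_keys s a).mpr hmema)
    have hndA : A'.Nodup := (List.nodup_cons.mp hnd).2
    have hnotmem : a ∉ A' := (List.nodup_cons.mp hnd).1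
    obtain ⟨hkf, hgf⟩ := ih (s.insert a (s.getD a 0 + pvDelta F K a)) hndA
      (fun x hx => by rw [hkeys']; exact hmem x (by simp [hx])) (by rw [hkeys']; exact hk)
    refine ⟨by rw [hkf, hkeys'], ?_⟩
    intro x
    rw [hgf x]
    by_cases hxa : x = a
    · subst hxa
      rw [if_neg hnotmem, if_pos (by simp), PySem.Dict.getD_insert_self]
    · rw [PySem.Dict.getD_insert _ _ _ _ _ , if_neg hxa]
      by_cases hxA : x ∈ A' <;> simp [hxA, hxa]

-- insertBy commutes with map when the comparison factors through the map
lemma pvInsertByMap {α β : Type} (g : α → β) (bg : β → β → Bool) (x : α) (ys : List α) :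
    PySem.List.insertBy bg (g x) (ys.map g)
      = (PySem.List.insertBy (fun a b => bg (g a) (g b)) x ys).map g := by
  induction ys with
  | nil => simp [PySem.List.insertBy]
  | cons y ys ih =>
    simp only [List.map_cons, PySem.List.insertBy]
    by_cases h : bg (g x) (g y) = true <;> simp [h, ih]

-- a stable reverse sort commutes with map
lemma pvSortedMap {α β : Type} (l : List α) (g : α → β) (key : β → Int) :
    PySem.List.sorted (l.map g) key true
      = (PySem.List.sorted l (fun x => key (g x)) true).map g := by
  rw [PySem.List.sorted_rev_eq_foldl_insertBy, PySem.List.sorted_rev_eq_foldl_insertBy,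
      List.foldl_map]
  have : ∀ (acc : List α),
      l.foldl (fun acc x => PySem.List.insertBy (fun a b => decide (key b < key a)) (g x) acc) (acc.map g)
        = (l.foldl (fun acc x => PySem.List.insertBy (fun a b => decide (key (g b) < key (g a))) x acc) acc).map g := by
    induction l with
    | nil => intro acc; simp
    | cons z l ih =>
      intro acc
      simp only [List.foldl_cons]
      rw [pvInsertByMap g _ z acc, ih]
  simpa using this []

-- insertBy only looks at the comparisons of the new element with the list members
lemma pvInsertByCongr {α : Type} (b1 b2 : α → α → Bool) (x : α) (ys : List α)
    (h : ∀ y ∈ ys, b1 x y = b2 x y) :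
    PySem.List.insertBy b1 x ys = PySem.List.insertBy b2 x ys := by
  induction ys with
  | nil => rfl
  | cons y ys ih =>
    simp only [PySem.List.insertBy]
    rw [h y (by simp)]
    by_cases hb : b2 x y = true
    · simp [hb]
    · simp [hb, ih (fun y hy => h y (by simp [hy]))]

-- two keys inducing the same strict order on the list sort it identically
lemma pvSortedCongr {α : Type} (l : List α) (k1 k2 : α → Int)
    (h : ∀ a ∈ l, ∀ b ∈ l, (k1 a < k1 b ↔ k2 a < k2 b)) :
    PySem.List.sorted l k1 true = PySem.List.sorted l k2 true := by
  rw [PySem.List.sorted_rev_eq_foldl_insertBy, PySem.List.sorted_rev_eq_foldl_insertBy]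
  have main : ∀ (l' : List α) (acc : List α), (∀ x ∈ l', x ∈ l) → (∀ y ∈ acc, y ∈ l) →
      l'.foldl (fun acc x => PySem.List.insertBy (fun a b => decide (k1 b < k1 a)) x acc) acc
        = l'.foldl (fun acc x => PySem.List.insertBy (fun a b => decide (k2 b < k2 a)) x acc) acc := by
    intro l'
    induction l' with
    | nil => intro acc _ _; rfl
    | cons z l' ih =>
      intro acc hl' hacc
      simp only [List.foldl_cons]
      have hz : z ∈ l := hl' z (by simp)
      rw [pvInsertByCongr (fun a b => decide (k1 b < k1 a)) (fun a b => decide (k2 b < k2 a)) z acc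
        (fun y hy => decide_eq_decide.mpr (h y (hacc y hy) z hz))]
      exact ih _ (fun x hx => hl' x (by simp [hx]))
        (fun y hy => by
          rcases (PySem.List.mem_insertBy _ z y acc).mp hy with h' | h'
          · exact h' ▸ hz
          · exact hacc y h')
  exact main l [] (fun x hx => hx) (by simp)

-- a strict count comparison: a pointwise implication plus one witness
lemma pvCountPLt {α : Type} (l : List α) (p q : α → Bool)
    (hmono : ∀ x ∈ l, p x = true → q x = true)
    (x : α) (hx : x ∈ l) (hqx : q x = true) (hpx : p x = false) :
    l.countP p < l.countP q := by
  obtain ⟨l1, l2, rfl⟩ := List.append_of_mem hx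
  rw [List.countP_append, List.countP_append, List.countP_cons, List.countP_cons, hqx, hpx]
  norm_num
  have h1 : l1.countP p ≤ l1.countP q :=
    List.countP_mono_left (fun y hy => hmono y (by simp [hy]))
  have h2 : l2.countP p ≤ l2.countP q :=
    List.countP_mono_left (fun y hy => hmono y (by simp [hy]))
  omega

-- the Copeland score is strictly monotone in the frequency
lemma pvDeltaMonoAux (F : PySem.Dict Int Int) (K : List Int)
    (a : Int) (ha : a ∈ K) (b : Int) (_hb : b ∈ K)
    (hab : F.getD a 0 < F.getD b 0) : pvDelta F K a < pvDelta F K b := by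
  have h1 : K.countP (fun c => decide (F.getD c 0 < F.getD a 0))
      < K.countP (fun c => decide (F.getD c 0 < F.getD b 0)) := by
    apply pvCountPLt K _ _ (fun c _ hc => by simp at hc ⊢; omega) a ha
      (by rw [decide_eq_true_eq]; omega) (by rw [decide_eq_false_iff_not]; omega)
  have h2 : K.countP (fun c => decide (F.getD b 0 < F.getD c 0))
      ≤ K.countP (fun c => decide (F.getD a 0 < F.getD c 0)) :=
    List.countP_mono_left (fun c _ hc => by simp at hc ⊢; omega)
  simp only [pvDelta]
  omega

lemma pvDeltaMono (F : PySem.Dict Int Int) (K : List Int)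
    (a : Int) (ha : a ∈ K) (b : Int) (hb : b ∈ K) :
    (pvDelta F K a < pvDelta F K b ↔ F.getD a 0 < F.getD b 0) := by
  constructor
  · intro hlt
    rcases lt_trichotomy (F.getD a 0) (F.getD b 0) with h | h | h
    · exact h
    · exfalso
      have : pvDelta F K a = pvDelta F K b := by
        simp only [pvDelta]
        rw [h]
      omega
    · exact absurd (pvDeltaMonoAux F K b hb a ha h) (by omega)
  · exact pvDeltaMonoAux F K a ha b hb

-- the two ports agree on every input
lemma pvMain (votes : List (List Int)) :
    copeland_voting_rule votes = copeland_voting_rule_alt votes := by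
  simp only [copeland_voting_rule, copeland_voting_rule_alt]
  rw [pvFreqA votes (fun vl => (PySem.List.pyGet? vl 0).getD 0),
      pvFreqB votes (fun vl => (PySem.List.pyGet? vl 0).getD 0)]
  set F := PySem.Dict.counter (votes.map (fun vl => (PySem.List.pyGet? vl 0).getD 0)) with hF
  set K := F.keys with hK
  have hndK : K.Nodup := by
    rw [hK, hF, PySem.Dict.keys_counter]
    exact PySem.Set.nodup_ofList _
  have hItems0 : (K.foldl (fun s alt => s.insert alt (0:Int)) PySem.Dict.empty).items
      = K.map (fun a => (a, (0:Int))) := by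
    have := PySem.Dict.items_foldl_insert_fresh K (fun a => a) (fun _ => (0:Int)) PySem.Dict.empty
      (fun a _ => by simp [PySem.Dict.contains_empty]) (by simpa using hndK)
    simpa using this
  set s0 := K.foldl (fun s alt => s.insert alt (0:Int)) PySem.Dict.empty with hs0
  have hKeys0 : s0.keys = K := by
    simp only [PySem.Dict.keys, hItems0, List.map_map]
    exact List.map_id K
  have hGetD0 : ∀ x, s0.getD x 0 = 0 := by
    intro x
    by_cases hx : x ∈ K
    · exact PySem.Dict.getD_of_mem_items s0 (by rw [hItems0]; exact List.mem_map_of_mem hx)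
        (by rw [hKeys0]; exact hndK) 0
    · exact PySem.Dict.getD_of_not_contains s0 0 (by
        rw [← Bool.not_eq_true, PySem.Dict.contains_iff_mem_keys, hKeys0]; exact hx)
  obtain ⟨hKeysS, hGetDS⟩ := pvOuter F K K s0 hndK (fun x hx => by rw [hKeys0]; exact hx)
    (by rw [hKeys0]; exact hndK)
  set scores := K.foldl (fun s altA =>
      K.foldl (fun s altB =>
        if altA = altB then s
        else if F.getD altA 0 > F.getD altB 0 then s.insert altA (s.getD altA 0 + 1)
        else if F.getD altA 0 < F.getD altB 0 then s.insert altA (s.getD altA 0 - 1)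
        else s) s) s0 with hscores
  have hItemsS : scores.items = K.map (fun a => (a, pvDelta F K a)) := by
    rw [PySem.Dict.items_eq_map_keys scores (by rw [hKeysS, hKeys0]; exact hndK) 0]
    rw [hKeysS, hKeys0]
    apply List.map_congr_left
    intro a ha
    rw [hGetDS a, if_pos ha, hGetD0 a, zero_add]
  rw [hItemsS, pvSortedMap K (fun a => (a, pvDelta F K a)) (fun p => p.2), List.map_map]
  have hcomp : ((fun p : Int × Int => p.1) ∘ fun a => (a, pvDelta F K a)) = fun a => a := rfl
  rw [hcomp, List.map_id']
  exact pvSortedCongr K (fun a => pvDelta F K a) (fun a => F.getD a 0)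
    (fun a ha b hb => pvDeltaMono F K a ha b hb)

-- ===== VERDICT (by name: the statement is the Claim_ definition above) =====
theorem copeland_voting_rule_spec : Claim_equal_copeland_voting_rule := by
  intro votes _ _
  unfold Spec_copeland_voting_rule
  exact pvMain votes
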